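-- pv_equiv track=rewrite | github.com/mwall-dev/LeetCode | Medium/0763_Partition_Labels.py | get_partition_end
-- ===== SOURCE A (Python) =====
-- def get_partition_end(S: str, partition_start):
--     """ Function to return end of partition index given a starting point"""
--
--     # Set initial naive partition end based on first letter
--     letter = S[partition_start]
--     partition_end = S.rfind(letter)
--     i = partition_start + 1
--
--     while i < partition_end:
--         # Look in the space after the partition for characters in the partition.
--         latest_index = S.rfind(S[i], partition_end)
--         # If you've found one outside the partition, you need to extend the partition end.
--         if latest_index != -1:
--             partition_end = latest_index
--         i += 1
--
--     return partition_end
-- ===== SOURCE B (Python) =====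
-- def get_partition_end(S, partition_start):
--     """Return end-of-partition index by counting 'open' characters.
--
--     Walk the suffix once keeping, for each character, how many occurrences
--     remain strictly after the current position; a character of the window is
--     'open' while it still has occurrences ahead.  The partition ends at the
--     first position where no character of the window is open.  No last-occurrence
--     index or rfind scan is used at all.
--     """
--     remaining = {}
--     for j in range(partition_start, len(S)):
--         ch = S[j]
--         remaining[ch] = remaining.get(ch, 0) + 1
--     open_count = 0
--     seen = set()
--     for j in range(partition_start, len(S)):
--         ch = S[j]
--         remaining[ch] -= 1
--         if ch not in seen:
--             seen.add(ch)
--             if remaining[ch] > 0: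
--                 open_count += 1
--         elif remaining[ch] == 0:
--             open_count -= 1
--         if open_count == 0:
--             return j
-- ===== Notes on version B (the rewrite author's own statement) =====
-- stated objective: alternative
-- what changed: B drops A's last-occurrence/extend-the-end scheme entirely: it counts each character's remaining occurrences in the suffix in one pass, then walks the partition once maintaining the number of still-'open' window characters, returning at the first position where no window character occurs later (no rfind and no last-occurrence index is ever computed).
import Mathlib
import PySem

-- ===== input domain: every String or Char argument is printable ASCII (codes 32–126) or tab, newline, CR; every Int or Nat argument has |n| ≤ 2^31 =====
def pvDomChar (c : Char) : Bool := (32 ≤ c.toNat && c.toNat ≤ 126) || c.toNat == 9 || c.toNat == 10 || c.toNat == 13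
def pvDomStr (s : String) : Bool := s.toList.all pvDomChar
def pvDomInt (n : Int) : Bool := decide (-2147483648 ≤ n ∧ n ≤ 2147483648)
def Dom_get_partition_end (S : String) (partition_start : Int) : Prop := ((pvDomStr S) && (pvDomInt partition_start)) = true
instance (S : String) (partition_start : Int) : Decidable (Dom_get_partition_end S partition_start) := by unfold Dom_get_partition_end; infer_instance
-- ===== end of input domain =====

-- B abandons A's rfind/extend-the-end scheme: it counts remaining occurrences of each suffix
-- character once, then walks the partition maintaining the number of still-'open' characters.

-- ===== PORT A =====
-- A's while loop, with fuel; fuel (len - start).toNat bounds the iteration count since i increases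
-- and partition_end stays < len.  The 'none' branch is where Python raises IndexError (outside Pre_).
def pyLoopA (S : String) : Nat → Int → Int → Int
  | 0, _, pe => pe
  | f + 1, i, pe =>
    if i < pe then
      match PySem.Str.pyGet? S i with
      | none => -1
      | some ci =>
        let latest := PySem.Str.rfindFrom S (String.ofList [ci]) pe none
        pyLoopA S f (i + 1) (if latest ≠ -1 then latest else pe)
    else pe

def get_partition_end (S : String) (partition_start : Int) : Int :=
  match PySem.Str.pyGet? S partition_start with
  | none => -1
  | some letter =>
    let partition_end := PySem.Str.rfind S (String.ofList [letter])
    pyLoopA S ((S.length : Int) - partition_start).toNat (partition_start + 1) partition_end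

-- ===== PORT B =====
-- remaining = {}; for j in range(partition_start, len(S)): remaining[S[j]] = remaining.get(S[j], 0) + 1
-- (the 'none' branch is Python's IndexError, outside Pre_)
def pyBuildRemaining (S : String) (st : Int) : PySem.Dict Char Int :=
  (PySem.List.pyRange st (S.length : Int) 1).foldl
    (fun d j =>
      match PySem.Str.pyGet? S j with
      | none => d
      | some ch => d.insert ch (d.getD ch 0 + 1)) PySem.Dict.empty

-- B's second loop over range(partition_start, len(S)) with early return; state (remaining, seen, open_count).
-- Returns none when the range is exhausted without returning (Python returns None; unreachable under Pre_).
def pyLoopB (S : String) : PySem.Dict Char Int → PySem.Set Char → Int → List Int → Option Int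
  | _, _, _, [] => none
  | rem, seen, opn, j :: js =>
    match PySem.Str.pyGet? S j with
    | none => none
    | some ch =>
      let r := rem.getD ch 0 - 1
      let rem' := rem.insert ch r
      if PySem.Set.contains seen ch then
        let opn' := if r = 0 then opn - 1 else opn
        if opn' = 0 then some j else pyLoopB S rem' seen opn' js
      else
        let seen' := PySem.Set.add seen ch
        let opn' := if r > 0 then opn + 1 else opn
        if opn' = 0 then some j else pyLoopB S rem' seen' opn' js

def get_partition_end_alt (S : String) (partition_start : Int) : Int :=
  let rem := pyBuildRemaining S partition_start
  match pyLoopB S rem PySem.Set.empty 0 (PySem.List.pyRange partition_start (S.length : Int) 1) with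
  | some r => r
  | none => 0   -- Python falls off the loop and returns None; unreachable under Pre_

-- ===== PRECONDITION & SPEC =====
-- Pre_ is exactly where Python A returns: S[partition_start] must not raise IndexError
-- (Python indexing accepts -len ≤ i < len; both programs agree on all of it, negative starts included).
def Pre_get_partition_end (S : String) (partition_start : Int) : Prop :=
  -(S.length : Int) ≤ partition_start ∧ partition_start < (S.length : Int)
instance (S : String) (partition_start : Int) : Decidable (Pre_get_partition_end S partition_start) := by unfold Pre_get_partition_end; infer_instance

def pvWitness_get_partition_end : String × Int := ("ababcbacadefegdehijhklij", 0)

def Spec_get_partition_end (S : String) (partition_start : Int) (out : Int) : Prop := out = get_partition_end_alt S partition_start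
instance (S : String) (partition_start : Int) (out : Int) : Decidable (Spec_get_partition_end S partition_start out) := by unfold Spec_get_partition_end; infer_instance

-- ===== CLAIM (what is proved, stated in full; the proofs are below) =====
def Claim_equal_get_partition_end : Prop := ∀ (S : String) (partition_start : Int), Dom_get_partition_end S partition_start → Pre_get_partition_end S partition_start → Spec_get_partition_end S partition_start (get_partition_end S partition_start)

-- ===== LEMMAS AND PROOFS =====

-- the character S[i] (Python wrapped indexing), as a total function; pvLast c = S.rfind(c)
def pvChar (s : List Char) (i : Int) : Char := (PySem.List.pyGet? s i).getD 'A'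
def pvLast (s : List Char) (c : Char) : Int := PySem.Chars.rfind s [c]

-- F j: every character of the window [st, j] has its last occurrence at or before j
def pvF (s : List Char) (st j : Int) : Prop :=
  ∀ i : Int, st ≤ i → i ≤ j → pvLast s (pvChar s i) ≤ j

-- both programs return THE first j ≥ st with F j
def pvIsEnd (s : List Char) (st r : Int) : Prop :=
  st ≤ r ∧ pvF s st r ∧ ∀ j, st ≤ j → j < r → ¬ pvF s st j

lemma pv_isEnd_unique (s : List Char) (st r1 r2 : Int)
    (h1 : pvIsEnd s st r1) (h2 : pvIsEnd s st r2) : r1 = r2 := by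
  rcases h1 with ⟨ha1, hf1, hm1⟩
  rcases h2 with ⟨ha2, hf2, hm2⟩
  rcases lt_trichotomy r1 r2 with h | h | h
  · exact absurd hf1 (hm2 r1 ha1 h)
  · exact h
  · exact absurd hf2 (hm1 r2 ha2 h)

-- ---- rfind lemmas (singleton pattern) ----

lemma pv_isPrefixOf_singleton (c : Char) (s : List Char) :
    [c].isPrefixOf s = true ↔ s[0]? = some c := by
  cases s with
  | nil => simp [List.isPrefixOf]
  | cons a t =>
      show (c == a && List.isPrefixOf [] t) = true ↔ _
      have hnil : List.isPrefixOf ([] : List Char) t = true := by cases t <;> rfl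
      simp [hnil]
      exact eq_comm

lemma pv_go_spec (s : List Char) (c : Char) (j : Nat) :
    PySem.Chars.rfind.go s [c] j = -1 ∨
      ∃ i : Nat, i ≤ j ∧ s[i]? = some c ∧ PySem.Chars.rfind.go s [c] j = (i : Int) := by
  induction j with
  | zero =>
      rw [PySem.Chars.rfind.go.eq_def]
      by_cases h : [c].isPrefixOf s = true
      · exact Or.inr ⟨0, le_refl _, (pv_isPrefixOf_singleton c s).1 h, by simp [h]⟩
      · simp [h]
  | succ j ih =>
      rw [PySem.Chars.rfind.go.eq_def]
      by_cases h : [c].isPrefixOf (s.drop (j + 1)) = true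
      · refine Or.inr ⟨j + 1, le_refl _, ?_, by simp [h]⟩
        have := (pv_isPrefixOf_singleton c (s.drop (j + 1))).1 h
        simpa [List.getElem?_drop] using this
      · simp only [h]
        rcases ih with h1 | ⟨i, hi, hc, he⟩
        · exact Or.inl h1
        · exact Or.inr ⟨i, Nat.le_succ_of_le hi, hc, he⟩

lemma pv_go_ge (s : List Char) (c : Char) (j : Nat) (i : Nat) (hij : i ≤ j)
    (hc : s[i]? = some c) : (i : Int) ≤ PySem.Chars.rfind.go s [c] j := by
  induction j with
  | zero =>
      interval_cases i
      rw [PySem.Chars.rfind.go.eq_def]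
      have : [c].isPrefixOf s = true := (pv_isPrefixOf_singleton c s).2 hc
      simp [this]
  | succ j ih =>
      rw [PySem.Chars.rfind.go.eq_def]
      by_cases h : [c].isPrefixOf (s.drop (j + 1)) = true
      · simp only [h, if_true]; exact_mod_cast hij
      · simp only [h]
        by_cases h' : i = j + 1
        · exfalso
          apply h
          apply (pv_isPrefixOf_singleton c (s.drop (j + 1))).2
          rw [List.getElem?_drop]
          simpa [h'] using hc
        · exact ih (by omega)

lemma pv_rfind_spec (s : List Char) (c : Char) :
    PySem.Chars.rfind s [c] = -1 ∨
      ∃ i : Nat, s[i]? = some c ∧ PySem.Chars.rfind s [c] = (i : Int) := by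
  unfold PySem.Chars.rfind
  rcases pv_go_spec s c s.length with h | ⟨i, _, hc, he⟩
  · exact Or.inl h
  · exact Or.inr ⟨i, hc, he⟩

lemma pv_rfind_ge (s : List Char) (c : Char) (i : Nat) (hc : s[i]? = some c) :
    (i : Int) ≤ PySem.Chars.rfind s [c] := by
  unfold PySem.Chars.rfind
  exact pv_go_ge s c s.length i (Nat.le_of_lt (List.getElem?_eq_some_iff.1 hc).1) hc

lemma pv_rfind_lt_length (s : List Char) (c : Char) :
    PySem.Chars.rfind s [c] < (s.length : Int) := by
  rcases pv_rfind_spec s c with h | ⟨i, hc, he⟩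
  · rw [h]; omega
  · rw [he]; exact_mod_cast (List.getElem?_eq_some_iff.1 hc).1

lemma pv_rfind_neg_one_iff (s : List Char) (c : Char) :
    PySem.Chars.rfind s [c] = -1 ↔ ∀ i : Nat, s[i]? ≠ some c := by
  constructor
  · intro h i hc
    have := pv_rfind_ge s c i hc
    omega
  · intro h
    rcases pv_rfind_spec s c with h1 | ⟨i, hc, _⟩
    · exact h1
    · exact absurd hc (h i)

-- rfindFrom with a nonnegative start is rfind, cut off below the start
lemma pv_rfindFrom_eq (s : List Char) (c : Char) (pe : Int) (h0 : 0 ≤ pe)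
    (hle : pe ≤ (s.length : Int)) :
    PySem.Chars.rfindFrom s [c] pe none =
      if pe ≤ PySem.Chars.rfind s [c] then PySem.Chars.rfind s [c] else -1 := by
  have hpe : (pe.toNat : Int) = pe := Int.toNat_of_nonneg h0
  unfold PySem.Chars.rfindFrom
  simp only
  rw [if_neg (show ¬ pe < 0 by omega), if_neg (show ¬ (s.length : Int) < pe by omega)]
  rw [Int.toNat_natCast, List.take_length]
  have hdrop : ∀ i : Nat, (s.drop pe.toNat)[i]? = s[pe.toNat + i]? := by
    intro i; rw [List.getElem?_drop]
  by_cases hcut : pe ≤ PySem.Chars.rfind s [c]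
  · rcases pv_rfind_spec s c with h | ⟨i, hc, he⟩
    · omega
    · have hipe : pe.toNat ≤ i := by omega
      have hocc : (s.drop pe.toNat)[i - pe.toNat]? = some c := by
        rw [hdrop]; rwa [Nat.add_sub_cancel' hipe]
      have hge := pv_rfind_ge (s.drop pe.toNat) c (i - pe.toNat) hocc
      have hne : PySem.Chars.rfind (s.drop pe.toNat) [c] ≠ -1 := by omega
      rw [if_neg hne, if_pos hcut]
      rcases pv_rfind_spec (s.drop pe.toNat) c with h' | ⟨i', hc', he'⟩
      · omega
      · rw [hdrop] at hc'
        have hub : ((pe.toNat + i' : Nat) : Int) ≤ PySem.Chars.rfind s [c] :=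
          pv_rfind_ge s c _ hc'
        rw [he] at hub ⊢
        rw [he'] at hge ⊢
        push_cast at hub hge ⊢
        omega
  · have hnone : PySem.Chars.rfind (s.drop pe.toNat) [c] = -1 := by
      apply (pv_rfind_neg_one_iff _ c).2
      intro i hc
      rw [hdrop] at hc
      have := pv_rfind_ge s c _ hc
      push_cast at this
      omega
    rw [if_pos hnone, if_neg hcut]

lemma pv_toList_mk_singleton (c : Char) : (String.ofList [c]).toList = [c] := by simp

-- ---- pvChar / pvLast facts ----

lemma pv_pyGet?_some (s : List Char) (i : Int) (hlo : -(s.length : Int) ≤ i)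
    (hhi : i < (s.length : Int)) : PySem.List.pyGet? s i = some (pvChar s i) := by
  unfold pvChar
  cases h : PySem.List.pyGet? s i with
  | none =>
      exfalso
      rw [PySem.List.pyGet?_eq_none_iff] at h
      exact h ⟨hlo, hhi⟩
  | some c => rfl

-- S[i] really occurs in s, at a (wrapped) position ≥ i
lemma pv_char_occ (s : List Char) (i : Int) (hlo : -(s.length : Int) ≤ i)
    (hhi : i < (s.length : Int)) :
    ∃ k : Nat, i ≤ (k : Int) ∧ s[k]? = some (pvChar s i) := by
  by_cases h0 : 0 ≤ i
  · refine ⟨i.toNat, by omega, ?_⟩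
    have := PySem.List.pyGet?_of_nonneg (xs := s) (i := i) h0
    rw [pv_pyGet?_some s i hlo hhi] at this
    exact this.symm
  · have hk : 0 < (-i).toNat ∧ (-i).toNat ≤ s.length := by omega
    have hi : i = -(((-i).toNat : Nat) : Int) := by omega
    refine ⟨s.length - (-i).toNat, by omega, ?_⟩
    have := PySem.List.pyGet?_neg_natCast (xs := s) (k := (-i).toNat) hk.1 hk.2
    rw [← hi, pv_pyGet?_some s i hlo hhi] at this
    exact this.symm

lemma pv_last_char_ge (s : List Char) (i : Int) (hlo : -(s.length : Int) ≤ i)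
    (hhi : i < (s.length : Int)) : i ≤ pvLast s (pvChar s i) ∧ 0 ≤ pvLast s (pvChar s i) := by
  obtain ⟨k, hk, hocc⟩ := pv_char_occ s i hlo hhi
  have := pv_rfind_ge s (pvChar s i) k hocc
  unfold pvLast
  omega

-- the last occurrence of c holds c
lemma pv_char_last (s : List Char) (c : Char) (h : 0 ≤ pvLast s c) :
    pvChar s (pvLast s c) = c ∧ pvLast s (pvChar s (pvLast s c)) = pvLast s c := by
  unfold pvLast at *
  rcases pv_rfind_spec s c with hne | ⟨i, hc, he⟩
  · omega
  · have h1 : pvChar s (PySem.Chars.rfind s [c]) = c := by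
      unfold pvChar
      rw [he, PySem.List.pyGet?_natCast, hc]
      rfl
    exact ⟨h1, by rw [h1]⟩

-- window/tail character lists
def pvW (s : List Char) (st b : Int) : List Char :=
  (PySem.List.pyRange st b 1).map (pvChar s)

-- membership in the index-window [a, n) of characters, via pvLast
lemma pv_mem_tail (s : List Char) (a : Int) (ha : -(s.length : Int) ≤ a) (c : Char) :
    c ∈ pvW s a (s.length : Int) ↔ max a 0 ≤ pvLast s c := by
  unfold pvW
  rw [List.mem_map]
  constructor
  · rintro ⟨i, hi, rfl⟩
    rw [PySem.List.mem_pyRange_one] at hi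
    obtain ⟨k, hk, hocc⟩ := pv_char_occ s i (by omega) hi.2
    have h1 := pv_rfind_ge s (pvChar s i) k hocc
    have h2 := (pv_last_char_ge s i (by omega) hi.2)
    unfold pvLast at *
    omega
  · intro h
    have h0 : 0 ≤ pvLast s c := by omega
    have hlt : pvLast s c < (s.length : Int) := pv_rfind_lt_length s c
    refine ⟨pvLast s c, ?_, (pv_char_last s c h0).1⟩
    rw [PySem.List.mem_pyRange_one]
    omega

-- F in terms of the window character list
lemma pv_F_iff (s : List Char) (st j : Int) :
    pvF s st j ↔ ∀ c ∈ pvW s st (j + 1), pvLast s c ≤ j := by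
  unfold pvF pvW
  constructor
  · intro h c hc
    rw [List.mem_map] at hc
    obtain ⟨i, hi, rfl⟩ := hc
    rw [PySem.List.mem_pyRange_one] at hi
    exact h i hi.1 (by omega)
  · intro h i h1 h2
    exact h _ (List.mem_map.2 ⟨i, PySem.List.mem_pyRange_one.2 ⟨h1, by omega⟩, rfl⟩)

-- ---- A-side: the loop lands on the first j with F j ----

-- exit state of A's loop: pe ≤ i means the while condition has failed (or the string is exhausted)
lemma pv_exitA (s : List Char) (st i pe : Int)
    (hA1 : ∀ i', st ≤ i' → i' < i → pvLast s (pvChar s i') ≤ pe)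
    (hA3 : ∀ j, st ≤ j → j < i - 1 → ¬ pvF s st j)
    (hA4 : ∃ i', st ≤ i' ∧ i' < i ∧ pvLast s (pvChar s i') = pe)
    (hpe : pe ≤ i) (hA7 : st ≤ pe) (h0 : 0 ≤ pe) :
    pvIsEnd s st pe := by
  obtain ⟨i0, hi0a, hi0b, hi0c⟩ := hA4
  have hcl := pv_char_last s (pvChar s i0) (by omega)
  refine ⟨hA7, ?_, ?_⟩
  · intro i'' h1 h2
    by_cases h : i'' < i
    · exact hA1 i'' h1 h
    · have he : i'' = pe := by omega
      rw [he, ← hi0c, hcl.2, hi0c]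
  · intro j h1 h2 hF
    by_cases h : j < i - 1
    · exact hA3 j h1 h hF
    · have h3 := hF i0 hi0a (by omega)
      omega

lemma pv_loopA_isEnd (S : String) (st : Int)
    (hst : -(S.toList.length : Int) ≤ st) :
    ∀ (fuel : Nat) (i pe : Int), st < i →
    (∀ i', st ≤ i' → i' < i → pvLast S.toList (pvChar S.toList i') ≤ pe) →
    (∀ j, st ≤ j → j < i - 1 → ¬ pvF S.toList st j) →
    (∃ i', st ≤ i' ∧ i' < i ∧ pvLast S.toList (pvChar S.toList i') = pe) →
    ((S.toList.length : Int) ≤ i + fuel) →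
    st ≤ pe → 0 ≤ pe →
    pvIsEnd S.toList st (pyLoopA S fuel i pe) := by
  intro fuel
  induction fuel with
  | zero =>
      intro i pe hlt hA1 hA3 hA4 hA6 hA7 h0
      have hpen : pe < (S.toList.length : Int) := by
        obtain ⟨i0, _, _, hi0c⟩ := hA4
        have := pv_rfind_lt_length S.toList (pvChar S.toList i0)
        unfold pvLast at hi0c
        omega
      show pvIsEnd S.toList st pe
      exact pv_exitA S.toList st i pe hA1 hA3 hA4 (by omega) hA7 h0
  | succ f ih =>
      intro i pe hlt hA1 hA3 hA4 hA6 hA7 h0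
      have hpen : pe < (S.toList.length : Int) := by
        obtain ⟨i0, _, _, hi0c⟩ := hA4
        have := pv_rfind_lt_length S.toList (pvChar S.toList i0)
        unfold pvLast at hi0c
        omega
      by_cases hc : i < pe
      · have hg : PySem.Str.pyGet? S i = some (pvChar S.toList i) := by
          rw [PySem.Str.pyGet?_eq, PySem.Chars.pyGet?_eq_listPyGet?]
          exact pv_pyGet?_some S.toList i (by omega) (by omega)
        have hA3' : ∀ j, st ≤ j → j < i → ¬ pvF S.toList st j := by
          intro j h1 h2 hF
          by_cases h : j < i - 1
          · exact hA3 j h1 h hF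
          · obtain ⟨i0, hi0a, hi0b, hi0c⟩ := hA4
            have h3 := hF i0 hi0a (by omega)
            omega
        have hrw : PySem.Str.rfindFrom S (String.ofList [pvChar S.toList i]) pe none =
            if pe ≤ pvLast S.toList (pvChar S.toList i)
            then pvLast S.toList (pvChar S.toList i) else -1 := by
          rw [PySem.Str.rfindFrom_eq, pv_toList_mk_singleton]
          exact pv_rfindFrom_eq S.toList (pvChar S.toList i) pe (by omega) (by omega)
        show pvIsEnd S.toList st (pyLoopA S (f + 1) i pe)
        rw [pyLoopA, if_pos hc, hg]
        simp only [hrw]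
        by_cases hle : pe ≤ pvLast S.toList (pvChar S.toList i)
        · rw [if_pos hle]
          have hne : pvLast S.toList (pvChar S.toList i) ≠ -1 := by omega
          rw [if_pos hne]
          apply ih (i + 1) _ (by omega) _ _ _ (by omega) (by omega) (by omega)
          · intro i' h1 h2
            by_cases h : i' < i
            · exact le_trans (hA1 i' h1 h) hle
            · have : i' = i := by omega
              rw [this]
          · intro j h1 h2
            exact hA3' j h1 (by omega)
          · exact ⟨i, by omega, by omega, rfl⟩
        · rw [if_neg hle]
          simp only [ne_eq, not_true_eq_false, if_false]
          apply ih (i + 1) pe (by omega) _ _ _ (by omega) hA7 h0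
          · intro i' h1 h2
            by_cases h : i' < i
            · exact hA1 i' h1 h
            · have : i' = i := by omega
              rw [this]; omega
          · intro j h1 h2
            exact hA3' j h1 (by omega)
          · obtain ⟨i0, h1, h2, h3⟩ := hA4
            exact ⟨i0, h1, by omega, h3⟩
      · show pvIsEnd S.toList st (pyLoopA S (f + 1) i pe)
        rw [pyLoopA, if_neg hc]
        exact pv_exitA S.toList st i pe hA1 hA3 hA4 (by omega) hA7 h0

-- ---- B-side ----

lemma pv_mem_W_last (s : List Char) (a b : Int) (ha : -(s.length : Int) ≤ a)
    (hb : b ≤ (s.length : Int)) (c : Char) (hc : c ∈ pvW s a b) : 0 ≤ pvLast s c := by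
  unfold pvW at hc
  rw [List.mem_map] at hc
  obtain ⟨i, hi, rfl⟩ := hc
  rw [PySem.List.mem_pyRange_one] at hi
  exact (pv_last_char_ge s i (by omega) (by omega)).2

-- counts from the first pass
lemma pv_buildRemaining (S : String) (st : Int) (hst : -(S.toList.length : Int) ≤ st) (c : Char) :
    (pyBuildRemaining S st).getD c 0 = ((pvW S.toList st (S.toList.length : Int)).count c : Int) := by
  have hlen : (S.length : Int) = (S.toList.length : Int) := by simp
  have hcongr : pyBuildRemaining S st =
      (PySem.List.pyRange st (S.toList.length : Int) 1).foldl
      (fun d j => d.insert (pvChar S.toList j) (d.getD (pvChar S.toList j) 0 + 1))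
        PySem.Dict.empty := by
    unfold pyBuildRemaining
    rw [hlen]
    apply PySem.List.foldl_congr_mem
    intro d j hj
    rw [PySem.List.mem_pyRange_one] at hj
    have hg : PySem.Str.pyGet? S j = some (pvChar S.toList j) := by
      rw [PySem.Str.pyGet?_eq, PySem.Chars.pyGet?_eq_listPyGet?]
      exact pv_pyGet?_some S.toList j (by omega) (by omega)
    rw [hg]
  have heq : ∀ (l : List Int) (d : PySem.Dict Char Int),
      l.foldl (fun d j => d.insert (pvChar S.toList j) (d.getD (pvChar S.toList j) 0 + 1)) d =
      (l.map (pvChar S.toList)).foldl (fun d x => d.insert x (d.getD x 0 + 1)) d := by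
    intro l
    induction l with
    | nil => intro d; rfl
    | cons x t ihl => intro d; rw [List.foldl_cons, List.map_cons, List.foldl_cons, ihl]
  rw [hcongr, heq]
  unfold pvW
  rw [PySem.Dict.getD_foldl_insert_add_one, PySem.Dict.getD_empty]
  omega

lemma pv_loopB_isEnd (S : String) (st : Int)
    (hst : -(S.toList.length : Int) ≤ st) :
    ∀ (fuel : Nat) (j : Int) (rem : PySem.Dict Char Int) (seen : PySem.Set Char) (opn : Int),
    st ≤ j → j < (S.toList.length : Int) → ((S.toList.length : Int) ≤ j + fuel) →
    (∀ c, rem.getD c 0 = ((pvW S.toList j (S.toList.length : Int)).count c : Int)) →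
    (∀ c, PySem.Set.contains seen c = true ↔ c ∈ pvW S.toList st j) →
    (opn = (((pvW S.toList st j).toFinset.filter
        (fun c => c ∈ pvW S.toList j (S.toList.length : Int))).card : Int)) →
    (∀ j', st ≤ j' → j' < j → ¬ pvF S.toList st j') →
    ∃ r, pyLoopB S rem seen opn (PySem.List.pyRange j (S.toList.length : Int) 1) = some r ∧
      pvIsEnd S.toList st r := by
  intro fuel
  induction fuel with
  | zero =>
      intro j rem seen opn hj1 hj2 hj6 hR hS hO hMin
      omega
  | succ f ih =>
      intro j rem seen opn hj1 hj2 hj6 hR hS hO hMin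
      have hrange : PySem.List.pyRange j (S.toList.length : Int) 1 =
          j :: PySem.List.pyRange (j + 1) (S.toList.length : Int) 1 :=
        PySem.List.pyRange_one_cons (by omega)
      have hg : PySem.Str.pyGet? S j = some (pvChar S.toList j) := by
        rw [PySem.Str.pyGet?_eq, PySem.Chars.pyGet?_eq_listPyGet?]
        exact pv_pyGet?_some S.toList j (by omega) (by omega)
      have hT : pvW S.toList j (S.toList.length : Int) =
          pvChar S.toList j :: pvW S.toList (j + 1) (S.toList.length : Int) := by
        unfold pvW
        rw [hrange, List.map_cons]
      have hW1 : pvW S.toList st (j + 1) = pvW S.toList st j ++ [pvChar S.toList j] := by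
        unfold pvW
        rw [PySem.List.pyRange_one_succ_right hj1, List.map_append, List.map_cons, List.map_nil]
      have hTj : ∀ c, c ∈ pvW S.toList j (S.toList.length : Int) ↔
          (c = pvChar S.toList j ∨ c ∈ pvW S.toList (j + 1) (S.toList.length : Int)) := by
        intro c
        rw [hT, List.mem_cons]
      have hr : rem.getD (pvChar S.toList j) 0 - 1 =
          ((pvW S.toList (j + 1) (S.toList.length : Int)).count (pvChar S.toList j) : Int) := by
        rw [hR, hT, List.count_cons_self]
        push_cast
        ring
      have hR' : ∀ c, (rem.insert (pvChar S.toList j) (rem.getD (pvChar S.toList j) 0 - 1)).getD c 0 =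
          ((pvW S.toList (j + 1) (S.toList.length : Int)).count c : Int) := by
        intro c
        rw [PySem.Dict.getD_insert]
        by_cases h : c = pvChar S.toList j
        · rw [if_pos h, h, hr]
        · rw [if_neg h, hR, hT]
          have h2 : ¬ pvChar S.toList j = c := fun he => h he.symm
          simp [h2]
      -- one uniform continuation for all four update branches
      have step : ∀ (rem' : PySem.Dict Char Int) (seen' : PySem.Set Char) (opn' : Int),
          (∀ c, rem'.getD c 0 = ((pvW S.toList (j + 1) (S.toList.length : Int)).count c : Int)) →
          (∀ c, PySem.Set.contains seen' c = true ↔ c ∈ pvW S.toList st (j + 1)) →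
          (opn' = (((pvW S.toList st (j + 1)).toFinset.filter
              (fun c => c ∈ pvW S.toList (j + 1) (S.toList.length : Int))).card : Int)) →
          ∃ r, (if opn' = 0 then some j
                else pyLoopB S rem' seen' opn'
                  (PySem.List.pyRange (j + 1) (S.toList.length : Int) 1)) = some r ∧
            pvIsEnd S.toList st r := by
        intro rem' seen' opn' hR'' hS'' hO''
        by_cases hz : opn' = 0
        · rw [if_pos hz]
          refine ⟨j, rfl, hj1, ?_, hMin⟩
          rw [pv_F_iff S.toList st j]
          intro c hc
          have h0c : 0 ≤ pvLast S.toList c :=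
            pv_mem_W_last S.toList st (j + 1) hst (by omega) c hc
          have hcard0 : ((pvW S.toList st (j + 1)).toFinset.filter
              (fun c => c ∈ pvW S.toList (j + 1) (S.toList.length : Int))).card = 0 := by
            omega
          rw [Finset.card_eq_zero] at hcard0
          have hnotT : c ∉ pvW S.toList (j + 1) (S.toList.length : Int) := by
            intro hmem
            have : c ∈ ((pvW S.toList st (j + 1)).toFinset.filter
                (fun c => c ∈ pvW S.toList (j + 1) (S.toList.length : Int))) :=
              Finset.mem_filter.2 ⟨List.mem_toFinset.2 hc, hmem⟩
            rw [hcard0] at this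
            exact absurd this (Finset.notMem_empty c)
          have hmt := pv_mem_tail S.toList (j + 1) (by omega) c
          rw [hmt] at hnotT
          omega
        · rw [if_neg hz]
          have hcardpos : 0 < ((pvW S.toList st (j + 1)).toFinset.filter
              (fun c => c ∈ pvW S.toList (j + 1) (S.toList.length : Int))).card := by
            omega
          obtain ⟨c, hcmem⟩ := Finset.card_pos.1 hcardpos
          rw [Finset.mem_filter] at hcmem
          obtain ⟨hcW, hcT⟩ := hcmem
          have hj1n : j + 1 < (S.toList.length : Int) := by
            by_contra h
            have hnil : pvW S.toList (j + 1) (S.toList.length : Int) = [] := by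
              unfold pvW
              rw [PySem.List.pyRange_one_eq_nil (by omega), List.map_nil]
            rw [hnil] at hcT
            exact absurd hcT (List.not_mem_nil)
          have hnotF : ¬ pvF S.toList st j := by
            intro hF
            have h1 := (pv_F_iff S.toList st j).1 hF c (List.mem_toFinset.1 hcW)
            have h2 := (pv_mem_tail S.toList (j + 1) (by omega) c).1 hcT
            omega
          have hMin' : ∀ j', st ≤ j' → j' < j + 1 → ¬ pvF S.toList st j' := by
            intro j' h1 h2
            by_cases h : j' < j
            · exact hMin j' h1 h
            · have : j' = j := by omega
              rw [this]
              exact hnotF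
          exact ih (j + 1) rem' seen' opn' (by omega) hj1n (by omega) hR'' hS'' hO'' hMin'
      rw [hrange]
      simp only [pyLoopB, hg]
      by_cases hseen : PySem.Set.contains seen (pvChar S.toList j) = true
      · rw [if_pos hseen]
        have hchW : pvChar S.toList j ∈ pvW S.toList st j := (hS _).1 hseen
        have hWfin1 : (pvW S.toList st (j + 1)).toFinset = (pvW S.toList st j).toFinset := by
          rw [hW1]
          ext c
          simp only [List.toFinset_append, Finset.mem_union, List.mem_toFinset, List.toFinset_cons,
            List.toFinset_nil, insert_empty_eq, Finset.mem_singleton]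
          constructor
          · rintro (h | rfl)
            · exact h
            · exact hchW
          · intro h
            exact Or.inl h
        have hS'' : ∀ c, PySem.Set.contains seen c = true ↔ c ∈ pvW S.toList st (j + 1) := by
          intro c
          rw [hS, hW1, List.mem_append, List.mem_singleton]
          constructor
          · exact Or.inl
          · rintro (h | rfl)
            · exact h
            · exact hchW
        by_cases hr0 : rem.getD (pvChar S.toList j) 0 - 1 = 0
        · rw [if_pos hr0]
          have hchT' : pvChar S.toList j ∉ pvW S.toList (j + 1) (S.toList.length : Int) := by
            have hcnt : ((pvW S.toList (j + 1) (S.toList.length : Int)).count (pvChar S.toList j) : Int) = 0 := by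
              omega
            rw [Nat.cast_eq_zero, List.count_eq_zero] at hcnt
            exact hcnt
          have hchA : pvChar S.toList j ∈ (pvW S.toList st j).toFinset.filter
              (fun c => c ∈ pvW S.toList j (S.toList.length : Int)) := by
            rw [Finset.mem_filter, List.mem_toFinset]
            exact ⟨hchW, (hTj _).2 (Or.inl rfl)⟩
          have hA' : (pvW S.toList st (j + 1)).toFinset.filter
              (fun c => c ∈ pvW S.toList (j + 1) (S.toList.length : Int)) =
              ((pvW S.toList st j).toFinset.filter
                (fun c => c ∈ pvW S.toList j (S.toList.length : Int))).erase (pvChar S.toList j) := by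
            rw [hWfin1]
            ext c
            rw [Finset.mem_erase, Finset.mem_filter, Finset.mem_filter, hTj]
            constructor
            · rintro ⟨h1, h2⟩
              exact ⟨fun he => hchT' (he ▸ h2), h1, Or.inr h2⟩
            · rintro ⟨h1, h2, h3 | h3⟩
              · exact absurd h3 h1
              · exact ⟨h2, h3⟩
          have hcarde := Finset.card_erase_of_mem hchA
          have hpos : 0 < ((pvW S.toList st j).toFinset.filter
              (fun c => c ∈ pvW S.toList j (S.toList.length : Int))).card :=
            Finset.card_pos.2 ⟨_, hchA⟩
          refine step _ _ _ hR' hS'' ?_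
          rw [hA', hcarde]
          omega
        · rw [if_neg hr0]
          have hchT' : pvChar S.toList j ∈ pvW S.toList (j + 1) (S.toList.length : Int) := by
            have hge : (0 : Int) ≤ ((pvW S.toList (j + 1) (S.toList.length : Int)).count (pvChar S.toList j) : Int) := by
              positivity
            have hcnt : 0 < (pvW S.toList (j + 1) (S.toList.length : Int)).count (pvChar S.toList j) := by
              omega
            exact List.count_pos_iff.1 hcnt
          refine step _ _ _ hR' hS'' ?_
          rw [hO, hWfin1]
          have hfe : ((pvW S.toList st j).toFinset.filter
              (fun c => c ∈ pvW S.toList (j + 1) (S.toList.length : Int))) =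
              ((pvW S.toList st j).toFinset.filter
              (fun c => c ∈ pvW S.toList j (S.toList.length : Int))) := by
            apply Finset.filter_congr
            intro c _
            rw [hTj]
            constructor
            · exact Or.inr
            · rintro (rfl | h)
              · exact hchT'
              · exact h
          rw [hfe]
      · rw [if_neg hseen]
        have hchW : pvChar S.toList j ∉ pvW S.toList st j := fun h => hseen ((hS _).2 h)
        have hchWf : pvChar S.toList j ∉ (pvW S.toList st j).toFinset :=
          fun h => hchW (List.mem_toFinset.1 h)
        have hWfin2 : (pvW S.toList st (j + 1)).toFinset =
            insert (pvChar S.toList j) (pvW S.toList st j).toFinset := by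
          rw [hW1]
          ext c
          simp only [List.toFinset_append, Finset.mem_union, List.mem_toFinset, List.toFinset_cons,
            List.toFinset_nil, insert_empty_eq, Finset.mem_singleton, Finset.mem_insert]
          tauto
        have hS'' : ∀ c, PySem.Set.contains (PySem.Set.add seen (pvChar S.toList j)) c = true ↔
            c ∈ pvW S.toList st (j + 1) := by
          intro c
          rw [PySem.Set.contains_iff, PySem.Set.mem_add, hW1, List.mem_append, List.mem_singleton]
          rw [← hS c, PySem.Set.contains_iff]
        have hbase : (pvW S.toList st j).toFinset.filter
            (fun c => c ∈ pvW S.toList (j + 1) (S.toList.length : Int)) =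
            (pvW S.toList st j).toFinset.filter
            (fun c => c ∈ pvW S.toList j (S.toList.length : Int)) := by
          apply Finset.filter_congr
          intro c hcmem
          have hcne : c ≠ pvChar S.toList j := fun he => hchWf (he ▸ hcmem)
          rw [hTj]
          constructor
          · exact fun h => Or.inr h
          · rintro (h | h)
            · exact absurd h hcne
            · exact h
        by_cases hrpos : rem.getD (pvChar S.toList j) 0 - 1 > 0
        · rw [if_pos hrpos]
          have hchT' : pvChar S.toList j ∈ pvW S.toList (j + 1) (S.toList.length : Int) := by
            have hcnt : 0 < (pvW S.toList (j + 1) (S.toList.length : Int)).count (pvChar S.toList j) := by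
              omega
            exact List.count_pos_iff.1 hcnt
          have hA' : (pvW S.toList st (j + 1)).toFinset.filter
              (fun c => c ∈ pvW S.toList (j + 1) (S.toList.length : Int)) =
              insert (pvChar S.toList j) ((pvW S.toList st j).toFinset.filter
                (fun c => c ∈ pvW S.toList j (S.toList.length : Int))) := by
            rw [hWfin2, Finset.filter_insert, if_pos hchT', hbase]
          have hnotmem : pvChar S.toList j ∉ (pvW S.toList st j).toFinset.filter
              (fun c => c ∈ pvW S.toList j (S.toList.length : Int)) := by
            rw [Finset.mem_filter]
            exact fun h => hchWf h.1
          refine step _ _ _ hR' hS'' ?_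
          rw [hA', Finset.card_insert_of_notMem hnotmem]
          omega
        · rw [if_neg hrpos]
          have hchT' : pvChar S.toList j ∉ pvW S.toList (j + 1) (S.toList.length : Int) := by
            have hge : (0 : Int) ≤ ((pvW S.toList (j + 1) (S.toList.length : Int)).count (pvChar S.toList j) : Int) := by
              positivity
            have hcnt : ((pvW S.toList (j + 1) (S.toList.length : Int)).count (pvChar S.toList j) : Int) = 0 := by
              omega
            rw [Nat.cast_eq_zero, List.count_eq_zero] at hcnt
            exact hcnt
          have hA' : (pvW S.toList st (j + 1)).toFinset.filter
              (fun c => c ∈ pvW S.toList (j + 1) (S.toList.length : Int)) =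
              (pvW S.toList st j).toFinset.filter
                (fun c => c ∈ pvW S.toList j (S.toList.length : Int)) := by
            rw [hWfin2, Finset.filter_insert, if_neg hchT', hbase]
          refine step _ _ _ hR' hS'' ?_
          rw [hA', hO]

-- ===== VERDICT (by name: the statement is the Claim_ definition above) =====
theorem get_partition_end_spec : Claim_equal_get_partition_end := by
  unfold Claim_equal_get_partition_end
  intro S ps _ hpre
  obtain ⟨hlo, hhi⟩ := hpre
  have hlen : (S.length : Int) = (S.toList.length : Int) := by simp
  rw [hlen] at hlo hhi
  have hg : PySem.Str.pyGet? S ps = some (pvChar S.toList ps) := by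
    rw [PySem.Str.pyGet?_eq, PySem.Chars.pyGet?_eq_listPyGet?]
    exact pv_pyGet?_some S.toList ps hlo hhi
  unfold Spec_get_partition_end get_partition_end get_partition_end_alt
  rw [hg]
  simp only
  have hge0 := pv_last_char_ge S.toList ps hlo hhi
  have hA : pvIsEnd S.toList ps
      (pyLoopA S ((S.length : Int) - ps).toNat (ps + 1)
        (PySem.Str.rfind S (String.ofList [pvChar S.toList ps]))) := by
    rw [PySem.Str.rfind_eq, pv_toList_mk_singleton]
    apply pv_loopA_isEnd S ps hlo _ _ _ (by omega)
    · intro i' h1 h2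
      have : i' = ps := by omega
      rw [this]
      unfold pvLast
      exact le_refl _
    · intro j h1 h2 hF
      omega
    · exact ⟨ps, le_refl ps, by omega, rfl⟩
    · rw [hlen]; omega
    · exact hge0.1
    · exact hge0.2
  obtain ⟨r, hr, hB⟩ := pv_loopB_isEnd S ps hlo ((S.toList.length : Int) - ps).toNat ps
      (pyBuildRemaining S ps) PySem.Set.empty 0 (le_refl ps) hhi (by omega)
      (pv_buildRemaining S ps hlo)
      (by
        intro c
        rw [PySem.Set.contains_iff]
        have : pvW S.toList ps ps = [] := by
          unfold pvW
          rw [PySem.List.pyRange_one_eq_nil (le_refl ps), List.map_nil]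
        rw [this]
        simp [PySem.Set.empty])
      (by
        have : pvW S.toList ps ps = [] := by
          unfold pvW
          rw [PySem.List.pyRange_one_eq_nil (le_refl ps), List.map_nil]
        rw [this]
        simp)
      (by intro j' h1 h2 _; omega)
  rw [hlen, hr]
  exact pv_isEnd_unique S.toList ps _ r hA hB
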